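-- pv_equiv track=rewrite | github.com/rjagerman/ANON | alternative-internet-crawler/generate_tables.py | get_markdown_table_header
-- ===== SOURCE A (Python) =====
-- def get_markdown_table_header(columns, add_links, sort_on=None):
--     if add_links:
--         linked_columns = columns.copy()
--         for key in linked_columns.keys():
--             if not key == sort_on:
--                 linked_columns[key] = '[%s](TABLE_%s.md)' % (linked_columns[key], linked_columns[key].replace(' ', '_').upper())
--         return get_markdown_table_header(linked_columns, add_links=False)
--     else:
--         return '%s%s%s\n' % ('| ', ' | '.join(columns.values()), ' |')
-- ===== SOURCE B (Python) =====
-- def get_markdown_table_header(columns, add_links, sort_on=None):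
--     # Single pass over the items, no dict copy and no recursion.
--     cells = []
--     for key, value in columns.items():
--         if add_links and key != sort_on:
--             cells.append('[%s](TABLE_%s.md)' % (value, value.replace(' ', '_').upper()))
--         else:
--             cells.append(value)
--     return '| ' + ' | '.join(cells) + ' |\n'
-- ===== Notes on version B (the rewrite author's own statement) =====
-- stated objective: simpler
-- what changed: Replaces A's dict copy + in-place relinking loop + recursive self-call with a single non-recursive pass over columns.items() that builds the cell list directly; Pre_ excludes association lists with duplicate keys, which do not represent a Python dict (Python's dict has already deduplicated them before either function runs).
import Mathlib
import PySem

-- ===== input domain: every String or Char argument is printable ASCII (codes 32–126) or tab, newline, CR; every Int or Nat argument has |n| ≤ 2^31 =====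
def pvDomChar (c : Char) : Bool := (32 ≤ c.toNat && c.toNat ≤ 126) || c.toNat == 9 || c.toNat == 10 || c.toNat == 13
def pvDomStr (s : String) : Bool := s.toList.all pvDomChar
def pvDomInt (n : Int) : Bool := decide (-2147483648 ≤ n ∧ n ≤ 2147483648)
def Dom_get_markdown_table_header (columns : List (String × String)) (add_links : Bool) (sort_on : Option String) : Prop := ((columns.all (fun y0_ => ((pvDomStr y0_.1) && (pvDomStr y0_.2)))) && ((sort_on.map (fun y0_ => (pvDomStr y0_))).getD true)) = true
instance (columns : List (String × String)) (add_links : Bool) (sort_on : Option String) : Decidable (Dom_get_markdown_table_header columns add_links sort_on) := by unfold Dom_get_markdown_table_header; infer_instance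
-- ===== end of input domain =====

-- B replaces A's dict copy + mutation loop + recursive self-call by one direct pass over the
-- items (objective: simpler). A does not mutate its argument (it copies first), neither does B.

-- '[%s](TABLE_%s.md)' % (v, v.replace(' ', '_').upper()) — shared by both ports (same literal expression in both Pythons)
def pvLink (v : String) : String :=
  "[" ++ v ++ "](TABLE_" ++ PySem.Str.upper (PySem.Str.replace v " " "_") ++ ".md)"

-- ===== PORT A =====
def get_markdown_table_header (columns : List (String × String)) (add_links : Bool) (sort_on : Option String) : String :=
  match add_links with
  | true =>
      -- linked_columns = columns.copy()  (the assoc list viewed as the dict it represents)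
      let linked0 : PySem.Dict String String := PySem.Dict.ofList columns
      -- for key in linked_columns.keys(): if not key == sort_on: linked_columns[key] = '[%s](…)' % …
      let linked := linked0.keys.foldl
        (fun ld key => if ¬ sort_on = some key then ld.modify key "" pvLink else ld) linked0
      -- return get_markdown_table_header(linked_columns, add_links=False)
      get_markdown_table_header linked.items false none
  | false =>
      -- '%s%s%s\n' % ('| ', ' | '.join(columns.values()), ' |')
      "| " ++ PySem.Str.join " | " (columns.map (fun p => p.2)) ++ " |\n"
termination_by if add_links then 1 else 0
decreasing_by simp

-- ===== PORT B =====
def get_markdown_table_header_alt (columns : List (String × String)) (add_links : Bool) (sort_on : Option String) : String :=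
  -- cells = []; for key, value in columns.items(): append linked or plain value
  let cells := columns.map (fun p =>
    if add_links ∧ ¬ sort_on = some p.1 then pvLink p.2 else p.2)
  "| " ++ PySem.Str.join " | " cells ++ " |\n"

-- ===== PRECONDITION & SPEC =====
-- Pre_ excludes association lists with duplicate keys: those do not represent any Python dict
-- (Python deduplicates before either function is called), so the convention leaves the corner
-- to the representation; both Pythons only ever receive duplicate-free key sets.
def Pre_get_markdown_table_header (columns : List (String × String)) (add_links : Bool) (sort_on : Option String) : Prop :=
  (columns.map Prod.fst).Nodup
instance (columns : List (String × String)) (add_links : Bool) (sort_on : Option String) : Decidable (Pre_get_markdown_table_header columns add_links sort_on) := by unfold Pre_get_markdown_table_header; infer_instance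

def pvWitness_get_markdown_table_header : (List (String × String)) × Bool × Option String :=
  ([("Name", "Name"), ("Score", "Total Score")], true, some "Name")

def Spec_get_markdown_table_header (columns : List (String × String)) (add_links : Bool) (sort_on : Option String) (out : String) : Prop := out = get_markdown_table_header_alt columns add_links sort_on
instance (columns : List (String × String)) (add_links : Bool) (sort_on : Option String) (out : String) : Decidable (Spec_get_markdown_table_header columns add_links sort_on out) := by unfold Spec_get_markdown_table_header; infer_instance

-- ===== CLAIM (what is proved, stated in full; the proofs are below) =====
def Claim_equal_get_markdown_table_header : Prop := ∀ (columns : List (String × String)) (add_links : Bool) (sort_on : Option String), Dom_get_markdown_table_header columns add_links sort_on → Pre_get_markdown_table_header columns add_links sort_on → Spec_get_markdown_table_header columns add_links sort_on (get_markdown_table_header columns add_links sort_on)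

-- ===== LEMMAS AND PROOFS =====

-- the loop body of A's port, named for the lemmas
def pvStep (sort_on : Option String) (ld : PySem.Dict String String) (key : String) : PySem.Dict String String :=
  if ¬ sort_on = some key then ld.modify key "" pvLink else ld

theorem pvStep_getD_ne (sort_on : Option String) (ld : PySem.Dict String String)
    (x k : String) (h : k ≠ x) : (pvStep sort_on ld x).getD k "" = ld.getD k "" := by
  unfold pvStep
  split
  · rw [PySem.Dict.getD_modify]; simp [h]
  · rfl

theorem getD_fold_not_mem (sort_on : Option String) (ks : List String)
    (ld : PySem.Dict String String) (k : String) (hk : k ∉ ks) :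
    (ks.foldl (pvStep sort_on) ld).getD k "" = ld.getD k "" := by
  induction ks generalizing ld with
  | nil => rfl
  | cons x xs ih =>
      simp only [List.mem_cons, not_or] at hk
      rw [List.foldl_cons, ih _ hk.2, pvStep_getD_ne _ _ _ _ hk.1]

theorem getD_fold (sort_on : Option String) (ks : List String) (hnd : ks.Nodup)
    (ld : PySem.Dict String String) (k : String) :
    (ks.foldl (pvStep sort_on) ld).getD k "" =
      if k ∈ ks ∧ ¬ sort_on = some k then pvLink (ld.getD k "") else ld.getD k "" := by
  induction ks generalizing ld with
  | nil => simp
  | cons x xs ih =>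
      rw [List.foldl_cons]
      rcases List.nodup_cons.mp hnd with ⟨hx, hxs⟩
      by_cases hkx : k = x
      · subst hkx
        rw [getD_fold_not_mem _ _ _ _ hx]
        unfold pvStep
        by_cases hcond : ¬ sort_on = some k
        · rw [if_pos hcond, PySem.Dict.getD_modify_self]
          simp [hcond]
        · rw [if_neg hcond]
          simp at hcond
          simp [hcond]
      · rw [ih hxs, pvStep_getD_ne _ _ _ _ hkx]
        simp [hkx]

theorem keys_fold (sort_on : Option String) (ks : List String)
    (ld : PySem.Dict String String) (h : ∀ k ∈ ks, k ∈ ld.keys) :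
    (ks.foldl (pvStep sort_on) ld).keys = ld.keys := by
  induction ks generalizing ld with
  | nil => rfl
  | cons x xs ih =>
      rw [List.foldl_cons]
      have hstep : (pvStep sort_on ld x).keys = ld.keys := by
        unfold pvStep
        split
        · rw [PySem.Dict.keys_modify,
              PySem.Dict.keys_insert_of_contains _ _
                ((PySem.Dict.contains_iff_mem_keys ld x).mpr (h x (List.mem_cons_self)))]
        · rfl
      rw [ih (pvStep sort_on ld x) (fun k hk => by rw [hstep]; exact h k (List.mem_cons_of_mem _ hk)), hstep]

theorem items_ofList_nodup (ps : List (String × String)) (h : (ps.map Prod.fst).Nodup) :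
    (PySem.Dict.ofList ps).items = ps := by
  have := PySem.Dict.items_foldl_insert_fresh ps Prod.fst Prod.snd
      (PySem.Dict.empty : PySem.Dict String String)
      (fun a _ => PySem.Dict.contains_empty a.1) h
  simpa [PySem.Dict.ofList, PySem.Dict.update] using this

-- ===== VERDICT (by name: the statement is the Claim_ definition above) =====

theorem get_markdown_table_header_spec : Claim_equal_get_markdown_table_header := by
  intro columns add_links sort_on _ hpre
  unfold Spec_get_markdown_table_header
  cases add_links with
  | false =>
      simp only [get_markdown_table_header, get_markdown_table_header_alt, false_and,
        if_false, Bool.false_eq_true]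
  | true =>
      rw [get_markdown_table_header]
      simp only [get_markdown_table_header, get_markdown_table_header_alt]
      -- both sides are '| ' ++ join ' | ' (…) ++ ' |\n'; it suffices that the cell lists agree
      set d : PySem.Dict String String := PySem.Dict.ofList columns with hd
      have hitems : d.items = columns := items_ofList_nodup columns hpre
      have hnd : d.keys.Nodup := PySem.Dict.nodup_keys_ofList columns
      have hfold :
          (d.keys.foldl (fun ld key => if ¬ sort_on = some key then ld.modify key "" pvLink else ld) d)
            = d.keys.foldl (pvStep sort_on) d := rfl
      rw [hfold]
      have hkeys : (d.keys.foldl (pvStep sort_on) d).keys = d.keys :=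
        keys_fold sort_on d.keys d (fun k hk => hk)
      have hndf : (d.keys.foldl (pvStep sort_on) d).keys.Nodup := by rw [hkeys]; exact hnd
      rw [PySem.Dict.items_eq_map_keys _ hndf "", hkeys]
      have hcols : columns = d.keys.map (fun k => (k, d.getD k "")) := by
        rw [← hitems]; exact PySem.Dict.items_eq_map_keys d hnd ""
      conv_rhs => rw [hcols]
      rw [List.map_map, List.map_map]
      refine congrArg (fun l => "| " ++ PySem.Str.join " | " l ++ " |\n") (List.map_congr_left ?_)
      intro k hk
      simp only [Function.comp]
      rw [getD_fold sort_on d.keys hnd d k]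
      simp [hk]
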